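-- pv_equiv track=rewrite | github.com/lks21c/hdsp_agent | backend/handlers/base.py | _escape_code_for_json
-- ===== SOURCE A (Python) =====
-- def _escape_code_for_json(json_str: str) -> str:
--     """JSON 내 code 필드의 Python 코드에서 문제가 되는 패턴을 escape 처리
--
--     문제: LLM이 생성한 코드에 .format()이 있으면 중괄호가 JSON 파싱을 깨뜨림
--     해결: "code" 필드 값 내부의 중괄호를 임시로 escape하고 파싱 후 복원
--     """
--     # "code": "..." 패턴을 찾아서 내부 처리
--     # 복잡한 중첩 구조 때문에 정규식보다 상태 기반 파싱 사용
--
--     result = []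
--     i = 0
--     n = len(json_str)
--
--     while i < n:
--         # "code": " 패턴 찾기
--         if json_str[i:i+8] == '"code": ':
--             result.append(json_str[i:i+8])
--             i += 8
--
--             # 공백 스킵
--             while i < n and json_str[i] in ' \t\n':
--                 result.append(json_str[i])
--                 i += 1
--
--             if i < n and json_str[i] == '"':
--                 # 문자열 시작
--                 result.append('"')
--                 i += 1
--
--                 # 문자열 끝까지 읽으면서 중괄호 escape
--                 while i < n:
--                     if json_str[i] == '\\' and i + 1 < n:
--                         # 이미 escape된 문자는 그대로
--                         result.append(json_str[i:i+2])
--                         i += 2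
--                     elif json_str[i] == '"':
--                         # 문자열 끝
--                         result.append('"')
--                         i += 1
--                         break
--                     elif json_str[i] == '{':
--                         # 중괄호를 escape (JSON에서 안전하게)
--                         result.append('\\u007b')
--                         i += 1
--                     elif json_str[i] == '}':
--                         result.append('\\u007d')
--                         i += 1
--                     else:
--                         result.append(json_str[i])
--                         i += 1
--             else:
--                 continue
--         else:
--             result.append(json_str[i])
--             i += 1
--
--     return ''.join(result)
-- ===== SOURCE B (Python) =====
-- def _escape_code_for_json(json_str: str) -> str:
--     # Flat state machine over one index: 0 = SEARCHING, 1 = AFTER_KEY, 2 = IN_STRING.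
--     out = []
--     i = 0
--     n = len(json_str)
--     state = 0
--     while i < n:
--         c = json_str[i]
--         if state == 0:
--             if json_str[i:i+8] == '"code": ':
--                 out.append('"code": ')
--                 i += 8
--                 state = 1
--             else:
--                 out.append(c)
--                 i += 1
--         elif state == 1:
--             if c in ' \t\n':
--                 out.append(c)
--                 i += 1
--             elif c == '"':
--                 out.append(c)
--                 i += 1
--                 state = 2
--             else:
--                 state = 0  # re-dispatch this char in SEARCHING without advancing
--         else:
--             if c == '\\' and i + 1 < n:
--                 out.append(json_str[i:i+2])
--                 i += 2
--             elif c == '"':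
--                 out.append(c)
--                 i += 1
--                 state = 0
--             elif c == '{':
--                 out.append('\\u007b')
--                 i += 1
--             elif c == '}':
--                 out.append('\\u007d')
--                 i += 1
--             else:
--                 out.append(c)
--                 i += 1
--     return ''.join(out)
-- ===== Notes on version B (the rewrite author's own statement) =====
-- stated objective: alternative
-- what changed: A's nested while-loops (pattern search containing a whitespace-skip loop containing a string-scanning loop) are replaced by one flat loop over the index with an explicit three-valued state variable (SEARCHING / AFTER_KEY / IN_STRING) dispatched each iteration.
import Mathlib
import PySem

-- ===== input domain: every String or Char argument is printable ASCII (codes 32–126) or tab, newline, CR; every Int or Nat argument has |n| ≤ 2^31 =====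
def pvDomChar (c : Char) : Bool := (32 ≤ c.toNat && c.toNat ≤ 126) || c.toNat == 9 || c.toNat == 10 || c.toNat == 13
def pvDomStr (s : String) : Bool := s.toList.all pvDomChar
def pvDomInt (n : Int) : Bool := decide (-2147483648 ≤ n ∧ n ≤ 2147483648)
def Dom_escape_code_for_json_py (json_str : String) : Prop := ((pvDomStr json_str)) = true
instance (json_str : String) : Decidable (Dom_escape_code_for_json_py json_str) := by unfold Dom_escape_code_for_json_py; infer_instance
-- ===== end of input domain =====

-- B replaces A's nested while-loops by one flat loop with an explicit state variable (same cost, different decomposition).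

-- ===== PORT A =====
-- the literal '"code": '
def pvKey : List Char := ['"', 'c', 'o', 'd', 'e', '"', ':', ' ']
-- the literal '\u007b'
def pvEsc7b : List Char := ['\\', 'u', '0', '0', '7', 'b']
-- the literal '\u007d'
def pvEsc7d : List Char := ['\\', 'u', '0', '0', '7', 'd']

mutual
-- A's outer while loop (SEARCHING for the '"code": ' pattern)
def escA_main : List Char → List Char
  | [] => []
  | c :: rest =>
    if List.take 8 (c :: rest) = pvKey then
      pvKey ++ escA_ws (List.drop 8 (c :: rest))
    else
      c :: escA_main rest
  termination_by l => 2 * l.length + 1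
  decreasing_by all_goals first | (simp_all; omega) | simp_all

-- A's whitespace-skip loop followed by the quote test (else: 'continue' back to the outer loop without advancing)
def escA_ws : List Char → List Char
  | [] => []
  | c :: rest =>
    if c = ' ' ∨ c = '\t' ∨ c = '\n' then c :: escA_ws rest
    else if c = '"' then '"' :: escA_str rest
    else escA_main (c :: rest)
  termination_by l => 2 * l.length + 2
  decreasing_by all_goals simp_all

-- A's inner string loop: backslash pair (only when a next char exists), closing quote, brace escaping
def escA_str : List Char → List Char
  | [] => []
  | c :: rest =>
    if c = '\\' ∧ rest ≠ [] then c :: rest.headI :: escA_str rest.tail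
    else if c = '"' then '"' :: escA_main rest
    else if c = '{' then pvEsc7b ++ escA_str rest
    else if c = '}' then pvEsc7d ++ escA_str rest
    else c :: escA_str rest
  termination_by l => 2 * l.length + 1
  decreasing_by all_goals simp_all [List.length_tail]
end

def escape_code_for_json_py (json_str : String) : String :=
  String.mk (escA_main json_str.toList)

-- ===== PORT B =====
-- B's explicit state variable
inductive PvSt : Type
  | search | afterKey | inString
deriving DecidableEq, Repr

-- weight used only for termination of the single loop (AFTER_KEY may re-dispatch without advancing)
def pvStW : PvSt → Nat
  | .afterKey => 1
  | _ => 0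

-- B's single while loop: dispatch on the state each iteration; acc is Source B's 'out' list
def escB : PvSt → List Char → List Char → List Char
  | _, [], acc => acc
  | st, c :: rest, acc =>
    match st with
    | .search =>
      if List.take 8 (c :: rest) = pvKey then
        escB .afterKey (List.drop 8 (c :: rest)) (acc ++ pvKey)
      else
        escB .search rest (acc ++ [c])
    | .afterKey =>
      if c = ' ' ∨ c = '\t' ∨ c = '\n' then escB .afterKey rest (acc ++ [c])
      else if c = '"' then escB .inString rest (acc ++ [c])
      else escB .search (c :: rest) acc
    | .inString =>
      if c = '\\' ∧ rest ≠ [] then escB .inString rest.tail (acc ++ [c, rest.headI])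
      else if c = '"' then escB .search rest (acc ++ [c])
      else if c = '{' then escB .inString rest (acc ++ pvEsc7b)
      else if c = '}' then escB .inString rest (acc ++ pvEsc7d)
      else escB .inString rest (acc ++ [c])
  termination_by st l _ => 2 * l.length + pvStW st
  decreasing_by all_goals first | (simp_all [pvStW, List.length_tail]; omega) | simp_all [pvStW]

def escape_code_for_json_py_alt (json_str : String) : String :=
  String.mk (escB .search json_str.toList [])

-- ===== PRECONDITION & SPEC =====
def Spec_escape_code_for_json_py (json_str : String) (out : String) : Prop := out = escape_code_for_json_py_alt json_str
instance (json_str : String) (out : String) : Decidable (Spec_escape_code_for_json_py json_str out) := by unfold Spec_escape_code_for_json_py; infer_instance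

-- ===== CLAIM (what is proved, stated in full; the proofs are below) =====
def Claim_equal_escape_code_for_json_py : Prop := ∀ (json_str : String), Dom_escape_code_for_json_py json_str → Spec_escape_code_for_json_py json_str (escape_code_for_json_py json_str)

-- ===== LEMMAS AND PROOFS =====

theorem escB_eq_escA (n : ℕ) : ∀ l : List Char, l.length ≤ n →
    (∀ acc, escB .search l acc = acc ++ escA_main l) ∧
    (∀ acc, escB .afterKey l acc = acc ++ escA_ws l) ∧
    (∀ acc, escB .inString l acc = acc ++ escA_str l) := by
  induction n with
  | zero =>
    intro l hl
    have : l = [] := List.eq_nil_of_length_eq_zero (Nat.le_zero.mp hl)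
    subst this
    refine ⟨?_, ?_, ?_⟩ <;> intro acc <;> simp [escB, escA_main, escA_ws, escA_str]
  | succ n ih =>
    intro l hl
    have Hs : ∀ acc, escB .search l acc = acc ++ escA_main l := by
      intro acc
      match l with
      | [] => simp [escB, escA_main]
      | c :: rest =>
        rw [escB, escA_main]
        by_cases htake : List.take 8 (c :: rest) = pvKey
        · have h7 : 7 ≤ rest.length := by
            have h := congrArg List.length htake
            simp [pvKey] at h
            omega
          have hdl : (List.drop 8 (c :: rest)).length ≤ n := by
            simp at hl ⊢
            omega
          simp only [htake, if_pos]
          rw [(ih _ hdl).2.1, List.append_assoc]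
        · simp only [htake, if_neg, not_false_iff]
          have hrl : rest.length ≤ n := by simp at hl; omega
          rw [(ih _ hrl).1]
          simp
    have Hw : ∀ acc, escB .afterKey l acc = acc ++ escA_ws l := by
      intro acc
      match l with
      | [] => simp [escB, escA_ws]
      | c :: rest =>
        have hrl : rest.length ≤ n := by simp at hl; omega
        rw [escB, escA_ws]
        by_cases hws : c = ' ' ∨ c = '\t' ∨ c = '\n'
        · simp only [hws, if_pos]
          rw [(ih _ hrl).2.1]
          simp
        · simp only [hws, if_neg, not_false_iff]
          by_cases hq : c = '"'
          · simp only [hq, if_pos]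
            rw [(ih _ hrl).2.2]
            simp
          · simp only [hq, if_neg, not_false_iff]
            exact Hs acc
    have Hstr : ∀ acc, escB .inString l acc = acc ++ escA_str l := by
      intro acc
      match l with
      | [] => simp [escB, escA_str]
      | c :: rest =>
        have hrl : rest.length ≤ n := by simp at hl; omega
        have htl : rest.tail.length ≤ n := by
          rw [List.length_tail]
          omega
        rw [escB, escA_str]
        by_cases hbs : c = '\\' ∧ rest ≠ []
        · rw [if_pos hbs, if_pos hbs, (ih _ htl).2.2]
          simp
        · rw [if_neg hbs, if_neg hbs]
          by_cases hq : c = '"'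
          · simp only [hq, if_pos]
            rw [(ih _ hrl).1]
            simp
          · simp only [hq, if_neg, not_false_iff]
            by_cases ho : c = '{'
            · simp only [ho, if_pos]
              rw [(ih _ hrl).2.2]
              simp
            · simp only [ho, if_neg, not_false_iff]
              by_cases hc : c = '}'
              · simp only [hc, if_pos]
                rw [(ih _ hrl).2.2]
                simp
              · simp only [hc, if_neg, not_false_iff]
                rw [(ih _ hrl).2.2]
                simp
    exact ⟨Hs, Hw, Hstr⟩

-- ===== VERDICT (by name: the statement is the Claim_ definition above) =====
theorem escape_code_for_json_py_spec : Claim_equal_escape_code_for_json_py := by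
  intro s _
  unfold Spec_escape_code_for_json_py escape_code_for_json_py escape_code_for_json_py_alt
  rw [(escB_eq_escA s.toList.length s.toList le_rfl).1 []]
  simp
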